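-- pv_equiv track=rewrite | github.com/vote-by-mail/election-official-data | states/oklahoma/parse_pdf.py | makes_lines
-- ===== SOURCE A (Python) =====
-- def makes_lines(text):
--   lines = []
--   line = ''
--   for character in text:
--     if character == '\n':
--       lines.append(line)
--       line = ''
--       continue
--     line += character
--
--   # remove header
--   return lines[5:]
-- ===== SOURCE B (Python) =====
-- def makes_lines(text):
--   # bulk split instead of char-by-char accumulation: completed lines are
--   # everything before the last '\n'-separated segment; drop the 5 header lines
--   return text.split('\n')[:-1][5:]
-- ===== Notes on version B (the rewrite author's own statement) =====
-- stated objective: faster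
-- what changed: Replaces the character-by-character buffer-accumulation loop with one bulk library split on the newline separator, dropping the trailing unfinished segment and then the 5 header lines by slicing; the per-character Python-level string concatenation disappears.
import Mathlib
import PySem

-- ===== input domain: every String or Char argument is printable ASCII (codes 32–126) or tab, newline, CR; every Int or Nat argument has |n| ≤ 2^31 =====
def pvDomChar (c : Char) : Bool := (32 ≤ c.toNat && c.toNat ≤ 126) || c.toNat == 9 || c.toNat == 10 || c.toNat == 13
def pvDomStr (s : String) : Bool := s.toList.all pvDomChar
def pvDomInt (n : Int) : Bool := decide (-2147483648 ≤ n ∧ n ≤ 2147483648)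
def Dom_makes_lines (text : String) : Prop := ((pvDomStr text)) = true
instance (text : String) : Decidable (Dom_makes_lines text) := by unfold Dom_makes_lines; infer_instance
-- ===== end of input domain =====

-- B replaces A's per-character buffer loop by one bulk split('\n') with [:-1][5:]; objective: simpler.

-- ===== PORT A =====
def makes_lines (text : String) : List String :=
  PySem.List.slice
    ((text.toList.foldl
      (fun (st : List (List Char) × List Char) character =>
        if character = '\n' then (st.1 ++ [st.2], ([] : List Char))
        else (st.1, st.2 ++ [character]))
      (([] : List (List Char)), ([] : List Char))).1.map String.ofList)
    (some 5) none

-- ===== PORT B =====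
def makes_lines_alt (text : String) : List String :=
  PySem.List.slice
    (PySem.List.slice ((PySem.Chars.splitOn text.toList ['\n']).map String.ofList)
      none (some (-1)))
    (some 5) none

-- ===== PRECONDITION & SPEC =====
def Spec_makes_lines (text : String) (out : List String) : Prop := out = makes_lines_alt text
instance (text : String) (out : List String) : Decidable (Spec_makes_lines text out) := by unfold Spec_makes_lines; infer_instance

-- ===== CLAIM (what is proved, stated in full; the proofs are below) =====
def Claim_equal_makes_lines : Prop := ∀ (text : String), Dom_makes_lines text → Spec_makes_lines text (makes_lines text)

-- ===== LEMMAS AND PROOFS =====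

-- reference splitter with the buffer kept in order
def pvF : List Char → List Char → List (List Char)
  | [], cur => [cur]
  | c :: rest, cur => if c = '\n' then cur :: pvF rest [] else pvF rest (cur ++ [c])

theorem pvF_ne_nil (s cur : List Char) : pvF s cur ≠ [] := by
  induction s generalizing cur with
  | nil => simp [pvF]
  | cons c rest ih =>
    simp only [pvF]
    split_ifs <;> simp [ih]

theorem splitOn_go_eq (fuel : Nat) :
    ∀ (l cur : List Char) (acc : List (List Char)), l.length < fuel →
      PySem.Chars.splitOn.go ['\n'] fuel l cur acc = acc.reverse ++ pvF l cur.reverse := by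
  induction fuel with
  | zero => intro l cur acc h; omega
  | succ fuel ih =>
    intro l cur acc h
    cases l with
    | nil => simp [PySem.Chars.splitOn.go, pvF]
    | cons c rest =>
      by_cases hc : c = '\n'
      · subst hc
        have hpre : List.isPrefixOf ['\n'] ('\n' :: rest) = true := by
          simp [List.isPrefixOf]
        rw [show PySem.Chars.splitOn.go ['\n'] (fuel + 1) ('\n' :: rest) cur acc
              = PySem.Chars.splitOn.go ['\n'] fuel (List.drop 1 ('\n' :: rest)) [] (cur.reverse :: acc) by
              conv_lhs => rw [PySem.Chars.splitOn.go]
              simp [hpre]]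
        rw [ih _ _ _ (by simpa using Nat.lt_of_succ_lt_succ h)]
        simp [pvF]
      · have hpre : List.isPrefixOf ['\n'] (c :: rest) = false := by
          simp [List.isPrefixOf]
          exact fun h => hc h.symm
        rw [show PySem.Chars.splitOn.go ['\n'] (fuel + 1) (c :: rest) cur acc
              = PySem.Chars.splitOn.go ['\n'] fuel rest (c :: cur) acc by
              conv_lhs => rw [PySem.Chars.splitOn.go]
              simp [hpre]]
        rw [ih _ _ _ (by simpa using Nat.lt_of_succ_lt_succ h)]
        simp [pvF, hc]

theorem splitOn_eq_pvF (s : List Char) :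
    PySem.Chars.splitOn s ['\n'] = pvF s [] := by
  unfold PySem.Chars.splitOn
  rw [splitOn_go_eq (s.length + 1) s [] [] (by omega)]
  simp

theorem foldl_eq_pvF (s : List Char) :
    ∀ (lines : List (List Char)) (line : List Char),
      (s.foldl
        (fun (st : List (List Char) × List Char) character =>
          if character = '\n' then (st.1 ++ [st.2], ([] : List Char))
          else (st.1, st.2 ++ [character]))
        (lines, line)).1 = lines ++ (pvF s line).dropLast := by
  induction s with
  | nil => intro lines line; simp [pvF]
  | cons c rest ih =>
    intro lines line
    by_cases hc : c = '\n'
    · subst hc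
      simp only [List.foldl_cons]
      rw [ih]
      have h := pvF_ne_nil rest []
      simp [pvF, List.dropLast_cons_of_ne_nil h]
    · simp only [List.foldl_cons, if_neg hc]
      rw [ih]
      simp [pvF, hc]

-- ===== VERDICT (by name: the statement is the Claim_ definition above) =====
theorem makes_lines_spec : Claim_equal_makes_lines := by
  intro text _
  unfold Spec_makes_lines makes_lines makes_lines_alt
  rw [PySem.List.slice_to_neg_one, splitOn_eq_pvF, foldl_eq_pvF]
  simp [← List.map_dropLast]
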